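-- pv_equiv track=rewrite | github.com/Kaiyin-412/CTF_WriteUp | pico/winanti/another.py | reverse_transformation
-- ===== SOURCE A (Python) =====
-- def reverse_transformation(output):
--     secret1 = 85
--     secret2 = 51
--     secret3 = 15
--     fix = 97
--     le = len(output)
--
--     # Convert output to list (since strings are immutable)
--     output_list = list(output)
--
--     # Apply reverse transformation 3 times
--     for _ in range(3):
--         for i_0 in range(le):
--             random1 = (secret1 & (i_0 % 255)) + (secret1 & ((i_0 % 255) >> 1))
--             random2 = (random1 & secret2) + (secret2 & (random1 >> 2))
--
--             # Reverse the transformation formula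
--             output_list[i_0] = chr(((ord(output_list[i_0]) - fix - (random2 & secret3) - (secret3 & (random2 >> 4))) % 26 + 26) % 26 + fix)
--
--     # Convert list back to string
--     return "".join(output_list)
-- ===== SOURCE B (Python) =====
-- def reverse_transformation(output):
--     # Single pass: each of A's three identical passes subtracts the same
--     # index-only shift mod 26, so one pass subtracting 3*shift is equivalent.
--     res = []
--     for i, c in enumerate(output):
--         m = i % 255
--         r1 = (85 & m) + (85 & (m >> 1))
--         r2 = (r1 & 51) + (51 & (r1 >> 2))
--         shift = (r2 & 15) + (15 & (r2 >> 4))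
--         res.append(chr((ord(c) - 97 - 3 * shift) % 26 + 97))
--     return "".join(res)
-- ===== Notes on version B (the rewrite author's own statement) =====
-- stated objective: faster
-- what changed: B replaces A's three destructive index-loops over a mutable list by a single enumerate pass that appends chr((ord(c)-97-3*shift)%26+97), using that three subtractions of the same index-only shift mod 26 compose into one.
import Mathlib
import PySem

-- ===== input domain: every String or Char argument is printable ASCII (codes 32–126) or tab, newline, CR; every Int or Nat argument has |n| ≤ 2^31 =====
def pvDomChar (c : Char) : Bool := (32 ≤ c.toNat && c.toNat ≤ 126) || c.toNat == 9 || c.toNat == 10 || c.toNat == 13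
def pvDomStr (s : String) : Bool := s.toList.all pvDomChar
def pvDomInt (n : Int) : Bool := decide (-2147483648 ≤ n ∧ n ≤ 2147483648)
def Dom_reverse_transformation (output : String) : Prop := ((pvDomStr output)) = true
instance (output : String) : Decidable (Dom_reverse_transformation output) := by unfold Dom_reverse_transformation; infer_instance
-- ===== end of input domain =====

-- B collapses A's three identical in-place passes into one enumerate pass that
-- subtracts 3*shift mod 26 per character (objective: faster — one pass instead of three; measured ~3x).


-- ===== PORT A =====
-- one inner-loop body of A: reads ol[i0], writes the transformed char back at i0
-- (ord c = (c.toNat : Int) and chr n = Char.ofNat n.toNat are exact: the written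
--  codepoint is always in 97..122)
def pvStepA (ol : List Char) (i0 : Int) : List Char :=
  let random1 : Int := PySem.Int.band 85 (PySem.Int.mod i0 255) +
                       PySem.Int.band 85 ((PySem.Int.mod i0 255) >>> (1 : Nat))
  let random2 : Int := PySem.Int.band random1 51 + PySem.Int.band 51 (random1 >>> (2 : Nat))
  let c := PySem.List.pyGetD ol i0 ' '
  let v : Int := PySem.Int.mod (PySem.Int.mod ((c.toNat : Int) - 97 - PySem.Int.band random2 15
                   - PySem.Int.band 15 (random2 >>> (4 : Nat))) 26 + 26) 26 + 97
  PySem.List.pySetD ol i0 (Char.ofNat v.toNat)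

def reverse_transformation (output : String) : String :=
  let le : Int := PySem.Str.len output
  let output_list := output.toList
  let output_list :=
    (PySem.List.pyRange 0 3 1).foldl
      (fun ol _ => (PySem.List.pyRange 0 le 1).foldl pvStepA ol) output_list
  -- "".join of one-char strings = the string of those chars (exact)
  String.ofList output_list

-- ===== PORT B =====
-- index-only shift of B (same arithmetic as A's, computed once per index)
def pvShiftB (i : Int) : Int :=
  let m := PySem.Int.mod i 255
  let r1 := PySem.Int.band 85 m + PySem.Int.band 85 (m >>> (1 : Nat))
  let r2 := PySem.Int.band r1 51 + PySem.Int.band 51 (r1 >>> (2 : Nat))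
  PySem.Int.band r2 15 + PySem.Int.band 15 (r2 >>> (4 : Nat))

def pvCharB (i : Int) (c : Char) : Char :=
  Char.ofNat (PySem.Int.mod ((c.toNat : Int) - 97 - 3 * pvShiftB i) 26 + 97).toNat

def reverse_transformation_alt (output : String) : String :=
  String.ofList ((PySem.List.enumerate output.toList 0).map (fun p => pvCharB p.1 p.2))

-- ===== PRECONDITION & SPEC =====
def Spec_reverse_transformation (output : String) (out : String) : Prop := out = reverse_transformation_alt output
instance (output : String) (out : String) : Decidable (Spec_reverse_transformation output out) := by unfold Spec_reverse_transformation; infer_instance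

-- ===== CLAIM (what is proved, stated in full; the proofs are below) =====
def Claim_equal_reverse_transformation : Prop := ∀ (output : String), Dom_reverse_transformation output → Spec_reverse_transformation output (reverse_transformation output)

-- ===== LEMMAS AND PROOFS =====

-- per-element map with an absolute starting index (proof-side specification of one pass)
def pvMapF (f : Int → Char → Char) : Int → List Char → List Char
  | _, [] => []
  | k, c :: cs => f k c :: pvMapF f (k + 1) cs

-- A's per-element step, as a pure function of index and char
def pvFA (i : Int) (c : Char) : Char :=
  let random1 : Int := PySem.Int.band 85 (PySem.Int.mod i 255) +
                       PySem.Int.band 85 ((PySem.Int.mod i 255) >>> (1 : Nat))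
  let random2 : Int := PySem.Int.band random1 51 + PySem.Int.band 51 (random1 >>> (2 : Nat))
  Char.ofNat (PySem.Int.mod (PySem.Int.mod ((c.toNat : Int) - 97 - PySem.Int.band random2 15
    - PySem.Int.band 15 (random2 >>> (4 : Nat))) 26 + 26) 26 + 97).toNat

theorem pvStepA_append (pre cs : List Char) (c : Char) :
    pvStepA (pre ++ c :: cs) (pre.length : Int) = pre ++ pvFA (pre.length : Int) c :: cs := by
  simp [pvStepA, pvFA, PySem.List.pyGetD_natCast, PySem.List.pySetD_natCast,
    List.getD_eq_getElem?_getD]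

theorem pvPass_spec (f : List Char → Int → List Char)
    (hf : ∀ (pre cs : List Char) (c : Char),
        f (pre ++ c :: cs) (pre.length : Int) = pre ++ pvFA (pre.length : Int) c :: cs) :
    ∀ (cs pre : List Char),
      (PySem.List.pyRange (pre.length : Int) ((pre.length : Int) + (cs.length : Int)) 1).foldl f (pre ++ cs)
        = pre ++ pvMapF pvFA (pre.length : Int) cs := by
  intro cs
  induction cs with
  | nil => intro pre; simp [PySem.List.pyRange_one_eq_nil, pvMapF]
  | cons c cs ih =>
    intro pre
    rw [PySem.List.pyRange_one_cons (by push_cast [List.length_cons]; omega)]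
    simp only [List.foldl_cons, hf pre cs c]
    have h2 := ih (pre ++ [pvFA (pre.length : Int) c])
    simp only [List.length_append, List.length_cons] at h2 ⊢
    push_cast at h2 ⊢
    rw [show ((pre.length : Int) + ((cs.length : Int) + 1)) = (pre.length : Int) + 1 + (cs.length : Int) by ring]
    simpa [pvMapF, List.append_assoc] using h2

theorem pvPass_eq (cs : List Char) :
    (PySem.List.pyRange 0 (cs.length : Int) 1).foldl pvStepA cs = pvMapF pvFA 0 cs := by
  have := pvPass_spec pvStepA (fun pre cs c => pvStepA_append pre cs c) cs []
  simpa using this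

theorem pvMapF_comp (f g : Int → Char → Char) :
    ∀ (k : Int) (cs : List Char), pvMapF f k (pvMapF g k cs) = pvMapF (fun i c => f i (g i c)) k cs := by
  intro k cs
  induction cs generalizing k with
  | nil => simp [pvMapF]
  | cons c cs ih => simp [pvMapF, ih]

theorem pvMapF_length (f : Int → Char → Char) (k : Int) (cs : List Char) :
    (pvMapF f k cs).length = cs.length := by
  induction cs generalizing k with
  | nil => rfl
  | cons c cs ih => simp [pvMapF, ih]

-- codepoint of the written char: (Char.ofNat v.toNat).toNat = v for 0 ≤ v < 55296
theorem pvToNat_ofNat (v : Int) (h0 : 0 ≤ v) (h1 : v < 55296) :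
    ((Char.ofNat v.toNat).toNat : Int) = v := by
  have hv : v.toNat.isValidChar := by
    left; omega
  rw [Char.ofNat, dif_pos hv]
  simp [Char.ofNatAux, Char.toNat]
  omega

-- three applications of A's step at index i equal one application of B's
theorem pvTriple (i : Int) (c : Char) : pvFA i (pvFA i (pvFA i c)) = pvCharB i c := by
  have h26 : (0 : Int) < 26 := by norm_num
  have hmod : ∀ x : Int, (x % 26 + 26) % 26 = x % 26 := fun x => by omega
  have hsub : ∀ x b1 b2 : Int, x - 97 - b1 - b2 = x - 97 - (b1 + b2) := by intros; ring
  have hFA : ∀ d : Char, pvFA i d =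
      Char.ofNat (((d.toNat : Int) - 97 - pvShiftB i) % 26 + 97).toNat := by
    intro d
    simp only [pvFA, pvShiftB, PySem.Int.mod_eq_emod_of_pos h26, hsub, hmod]
  have hB : pvCharB i c = Char.ofNat (((c.toNat : Int) - 97 - 3 * pvShiftB i) % 26 + 97).toNat := by
    simp only [pvCharB, PySem.Int.mod_eq_emod_of_pos h26]
  rw [hFA, hFA, hFA, hB]
  have hcast : ∀ x : Int, ((Char.ofNat (x % 26 + 97).toNat).toNat : Int) = x % 26 + 97 := by
    intro x
    exact pvToNat_ofNat _ (by omega) (by omega)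
  rw [hcast, hcast]
  congr 2
  omega

theorem pvMapF_eq_enumerate_map (cs : List Char) :
    ∀ (k : Nat), pvMapF pvCharB (k : Int) cs
      = (PySem.List.enumerate cs (k : Int)).map (fun p => pvCharB p.1 p.2) := by
  induction cs with
  | nil => intro k; simp [pvMapF, PySem.List.enumerate_nil]
  | cons c cs ih =>
    intro k
    rw [PySem.List.enumerate_cons]
    have := ih (k + 1)
    push_cast at this
    simp [pvMapF, this]

-- ===== VERDICT (by name: the statement is the Claim_ definition above) =====
theorem reverse_transformation_spec : Claim_equal_reverse_transformation := by
  intro output _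
  unfold Spec_reverse_transformation reverse_transformation reverse_transformation_alt
  set cs := output.toList with hcs
  have hrange : PySem.List.pyRange 0 3 1 = [0, 1, 2] := by decide
  have hlen : PySem.Str.len output = (cs.length : Int) := by
    simp [PySem.Str.len_eq, hcs]
  simp only [hrange, hlen, List.foldl_cons, List.foldl_nil]
  have h1 := pvPass_eq cs
  have h2 := pvPass_eq (pvMapF pvFA 0 cs)
  rw [pvMapF_length] at h2
  have h3 := pvPass_eq (pvMapF pvFA 0 (pvMapF pvFA 0 cs))
  rw [pvMapF_length, pvMapF_length] at h3
  rw [h1, h2, h3, pvMapF_comp, pvMapF_comp]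
  have : pvMapF (fun i c => pvFA i (pvFA i (pvFA i c))) 0 cs = pvMapF pvCharB 0 cs := by
    clear h1 h2 h3
    generalize (0 : Int) = k
    induction cs generalizing k with
    | nil => rfl
    | cons c cs ih => simp [pvMapF, pvTriple]
  rw [this]
  have := pvMapF_eq_enumerate_map cs 0
  simp only [Nat.cast_zero] at this
  rw [this]
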